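-- pv_equiv track=rewrite | github.com/pollomarzo/polithesis | src/analyze/graph.py | parse_function_args
-- ===== SOURCE A (Python) =====
-- def parse_function_args(arg_string):
--     # Remove comments if any
--     arg_string = arg_string.split("#")[0]
--     # Remove leading and trailing parentheses, whitespace and newline
--     arg_string = "".join(arg_string.strip()[1:-1].strip().split())
--
--     args = []
--     current_arg = ""
--     bracket_count = 0
--     in_quotes = False
--     quote_char = None
--
--     for char in arg_string:
--         if char in "\"'" and not in_quotes:
--             in_quotes = True
--             quote_char = char
--             current_arg += char
--         elif char == quote_char and in_quotes:
--             in_quotes = False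
--             current_arg += char
--         elif char in "({[":
--             bracket_count += 1
--             current_arg += char
--         elif char in ")}]":
--             bracket_count -= 1
--             current_arg += char
--         elif char == "," and bracket_count == 0 and not in_quotes:
--             args.append(current_arg.strip())
--             current_arg = ""
--         else:
--             current_arg += char
--
--     if current_arg:
--         args.append(current_arg.strip())
--
--     # Remove keywords from keyword arguments
--     args = [arg.split("=")[-1].strip() if "=" in arg else arg for arg in args]
--
--     # Pad the list with None to always have 5 elements
--     args.extend([None] * (5 - len(args)))
--
--     return args[:5]
-- ===== SOURCE B (Python) =====
-- def parse_function_args(arg_string):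
--     # Same pre-processing as the original
--     s = arg_string.split("#")[0]
--     s = "".join(s.strip()[1:-1].strip().split())
--
--     # One pass: record indices of top-level commas instead of building current_arg
--     bounds = []
--     depth = 0
--     in_quotes = False
--     quote_char = None
--     for i, ch in enumerate(s):
--         if ch in "\"'" and not in_quotes:
--             in_quotes = True
--             quote_char = ch
--         elif ch == quote_char and in_quotes:
--             in_quotes = False
--         elif ch in "({[":
--             depth += 1
--         elif ch in ")}]":
--             depth -= 1
--         elif ch == "," and depth == 0 and not in_quotes:
--             bounds.append(i)
--
--     # Slice the string at the recorded boundaries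
--     segs = []
--     start = 0
--     for b in bounds:
--         segs.append(s[start:b].strip())
--         start = b + 1
--     if start < len(s):
--         segs.append(s[start:].strip())
--
--     # Same post-processing as the original
--     args = [seg.split("=")[-1].strip() if "=" in seg else seg for seg in segs]
--     args.extend([None] * (5 - len(args)))
--     return args[:5]
-- ===== Notes on version B (the rewrite author's own statement) =====
-- stated objective: alternative
-- what changed: Instead of accumulating current_arg character by character and flushing it at each top-level comma, B's scan only records the indices of top-level commas and afterwards slices the cleaned string at those boundaries (appending the final slice only when non-empty); pre- and post-processing are unchanged.
import Mathlib
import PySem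

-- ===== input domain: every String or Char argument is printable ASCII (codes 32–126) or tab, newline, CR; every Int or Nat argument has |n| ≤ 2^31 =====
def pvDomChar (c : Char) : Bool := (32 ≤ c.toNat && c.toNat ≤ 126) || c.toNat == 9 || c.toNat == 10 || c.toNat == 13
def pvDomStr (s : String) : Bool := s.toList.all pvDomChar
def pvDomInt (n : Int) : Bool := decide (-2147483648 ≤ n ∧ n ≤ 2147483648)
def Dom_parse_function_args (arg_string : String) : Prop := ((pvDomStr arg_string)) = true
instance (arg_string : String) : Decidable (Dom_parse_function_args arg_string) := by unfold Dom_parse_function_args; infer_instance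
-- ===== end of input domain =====

-- B records top-level comma indices in the scan and slices the cleaned string afterwards,
-- instead of accumulating current_arg character by character (objective: alternative decomposition, same cost).

-- ===== PORT A =====
-- shared pre-processing (identical lines in both Pythons):
-- arg_string.split("#")[0], then "".join(strip[1:-1].strip().split())
def pvClean (arg_string : String) : List Char :=
  let s0 := ((PySem.Chars.split? arg_string.toList ['#']).getD [[]]).headD []
  let s1 := PySem.Chars.strip (PySem.List.slice (PySem.Chars.strip s0) (some 1) (some (-1)))
  PySem.Chars.join [] (PySem.Chars.split₀ s1)

-- shared post-processing (identical lines in both Pythons):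
-- '=' split with strip, pad with None to 5, truncate to 5
def pvPost (args : List (List Char)) : List (Option String) :=
  let args2 := args.map (fun a =>
    if PySem.Chars.isIn ['='] a then
      PySem.Chars.strip (((PySem.Chars.split? a ['=']).getD [[]]).getLastD [])
    else a)
  (args2.map (fun a => some (String.ofList a)) ++ List.replicate (5 - args2.length) none).take 5

def pvStepA (st : List (List Char) × List Char × Int × Bool × Option Char) (c : Char) :
    List (List Char) × List Char × Int × Bool × Option Char :=
  match st with
  | (args, cur, bc, iq, qc) =>
    if (c == '"' || c == '\'') && !iq then (args, cur ++ [c], bc, true, some c)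
    else if (some c == qc) && iq then (args, cur ++ [c], bc, false, qc)
    else if c == '(' || c == '{' || c == '[' then (args, cur ++ [c], bc + 1, iq, qc)
    else if c == ')' || c == '}' || c == ']' then (args, cur ++ [c], bc - 1, iq, qc)
    else if c == ',' && bc == 0 && !iq then (args ++ [PySem.Chars.strip cur], [], bc, iq, qc)
    else (args, cur ++ [c], bc, iq, qc)

-- trailing "if current_arg: args.append(current_arg.strip())"
def pvFinA (st : List (List Char) × List Char × Int × Bool × Option Char) : List (List Char) :=
  if st.2.1 = [] then st.1 else st.1 ++ [PySem.Chars.strip st.2.1]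

def parse_function_args (arg_string : String) : List (Option String) :=
  pvPost (pvFinA ((pvClean arg_string).foldl pvStepA ([], [], 0, false, none)))

-- ===== PORT B =====
def pvStepB (st : List Int × Int × Bool × Option Char) (p : Int × Char) :
    List Int × Int × Bool × Option Char :=
  match st, p with
  | (bs, depth, iq, qc), (i, c) =>
    if (c == '"' || c == '\'') && !iq then (bs, depth, true, some c)
    else if (some c == qc) && iq then (bs, depth, false, qc)
    else if c == '(' || c == '{' || c == '[' then (bs, depth + 1, iq, qc)
    else if c == ')' || c == '}' || c == ']' then (bs, depth - 1, iq, qc)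
    else if c == ',' && depth == 0 && !iq then (bs ++ [i], depth, iq, qc)
    else (bs, depth, iq, qc)

-- the slicing loop "segs.append(s[start:b].strip()); start = b + 1" and the trailing
-- "if start < len(s): segs.append(s[start:].strip())"
def pvSliceStep (s : List Char) (p : List (List Char) × Int) (b : Int) :
    List (List Char) × Int :=
  (p.1 ++ [PySem.Chars.strip (PySem.List.slice s (some p.2) (some b))], b + 1)

def pvFinB (s : List Char) (p : List (List Char) × Int) : List (List Char) :=
  if p.2 < (s.length : Int) then p.1 ++ [PySem.Chars.strip (PySem.List.slice s (some p.2) none)]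
  else p.1

def parse_function_args_alt (arg_string : String) : List (Option String) :=
  pvPost (pvFinB (pvClean arg_string)
    ((((PySem.List.enumerate (pvClean arg_string) 0).foldl pvStepB ([], 0, false, none)).1).foldl
      (pvSliceStep (pvClean arg_string)) ([], 0)))

-- ===== PRECONDITION & SPEC =====
def Spec_parse_function_args (arg_string : String) (out : List (Option String)) : Prop := out = parse_function_args_alt arg_string
instance (arg_string : String) (out : List (Option String)) : Decidable (Spec_parse_function_args arg_string out) := by unfold Spec_parse_function_args; infer_instance

-- ===== CLAIM (what is proved, stated in full; the proofs are below) =====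
def Claim_equal_parse_function_args : Prop := ∀ (arg_string : String), Dom_parse_function_args arg_string → Spec_parse_function_args arg_string (parse_function_args arg_string)

-- ===== LEMMAS AND PROOFS =====

-- reference segmentation: raw segments of the cleaned string at top-level commas
def pvCons1 (c : Char) (l : List (List Char)) : List (List Char) := l.modifyHead (c :: ·)

def pvRaw : List Char → Int → Bool → Option Char → List (List Char)
  | [], _, _, _ => [[]]
  | c :: t, bc, iq, qc =>
    if (c == '"' || c == '\'') && !iq then pvCons1 c (pvRaw t bc true (some c))
    else if (some c == qc) && iq then pvCons1 c (pvRaw t bc false qc)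
    else if c == '(' || c == '{' || c == '[' then pvCons1 c (pvRaw t (bc + 1) iq qc)
    else if c == ')' || c == '}' || c == ']' then pvCons1 c (pvRaw t (bc - 1) iq qc)
    else if c == ',' && bc == 0 && !iq then [] :: pvRaw t bc iq qc
    else pvCons1 c (pvRaw t bc iq qc)

-- drop the final segment iff it is empty (A's trailing "if current_arg" / B's "if start < len")
def pvTrim (R : List (List Char)) : List (List Char) :=
  if R.getLast? = some [] then R.dropLast else R

def pvIdx : List Char → Int → Int → Bool → Option Char → List Int
  | [], _, _, _, _ => []
  | c :: t, i, bc, iq, qc =>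
    if (c == '"' || c == '\'') && !iq then pvIdx t (i + 1) bc true (some c)
    else if (some c == qc) && iq then pvIdx t (i + 1) bc false qc
    else if c == '(' || c == '{' || c == '[' then pvIdx t (i + 1) (bc + 1) iq qc
    else if c == ')' || c == '}' || c == ']' then pvIdx t (i + 1) (bc - 1) iq qc
    else if c == ',' && bc == 0 && !iq then i :: pvIdx t (i + 1) bc iq qc
    else pvIdx t (i + 1) bc iq qc

theorem pv_mh_ne_nil (R : List (List Char)) (f : List Char → List Char) (h : R ≠ []) :
    R.modifyHead f ≠ [] := by
  cases R with
  | nil => exact absurd rfl h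
  | cons a t => simp

theorem pvRaw_ne_nil (l : List Char) (bc : Int) (iq : Bool) (qc : Option Char) :
    pvRaw l bc iq qc ≠ [] := by
  induction l generalizing bc iq qc with
  | nil => simp [pvRaw]
  | cons c t ih =>
    simp only [pvRaw]
    split_ifs <;>
      first
        | exact pv_mh_ne_nil _ _ (ih _ _ _)
        | simp

theorem pv_mh_mh (R : List (List Char)) (c : Char) (cur : List Char) :
    (pvCons1 c R).modifyHead (cur ++ ·) = R.modifyHead ((cur ++ [c]) ++ ·) := by
  cases R <;> simp [pvCons1]

theorem pv_mh_nil (R : List (List Char)) : R.modifyHead (([] : List Char) ++ ·) = R := by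
  cases R <;> simp

theorem pvTrim_cons (x : List Char) (R : List (List Char)) (h : R ≠ []) :
    pvTrim (x :: R) = x :: pvTrim R := by
  cases R with
  | nil => exact absurd rfl h
  | cons r rs =>
    simp only [pvTrim, List.getLast?_cons_cons]
    split_ifs <;> simp

theorem pvLemA (l : List Char) (args : List (List Char)) (cur : List Char)
    (bc : Int) (iq : Bool) (qc : Option Char) :
    pvFinA (l.foldl pvStepA (args, cur, bc, iq, qc))
    = args ++ (pvTrim ((pvRaw l bc iq qc).modifyHead (cur ++ ·))).map PySem.Chars.strip := by
  induction l generalizing args cur bc iq qc with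
  | nil =>
    by_cases h : cur = [] <;> simp [pvFinA, pvRaw, pvTrim, h]
  | cons c t ih =>
    simp only [List.foldl_cons, pvStepA, pvRaw]
    split_ifs with h1 h2 h3 h4 h5
    · rw [ih, pv_mh_mh]
    · rw [ih, pv_mh_mh]
    · rw [ih, pv_mh_mh]
    · rw [ih, pv_mh_mh]
    · rw [ih, pv_mh_nil]
      have hne := pvRaw_ne_nil t bc iq qc
      have hhd : ((([] : List Char) :: pvRaw t bc iq qc).modifyHead (cur ++ ·))
          = cur :: pvRaw t bc iq qc := by simp
      rw [hhd, pvTrim_cons _ _ hne]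
      simp
    · rw [ih, pv_mh_mh]

theorem pvLemB1 (l : List Char) (i : Int) (bs : List Int) (bc : Int) (iq : Bool) (qc : Option Char) :
    ((PySem.List.enumerate l i).foldl pvStepB (bs, bc, iq, qc)).1 = bs ++ pvIdx l i bc iq qc := by
  induction l generalizing i bs bc iq qc with
  | nil => simp [PySem.List.enumerate_nil, pvIdx]
  | cons c t ih =>
    rw [PySem.List.enumerate_cons]
    simp only [List.foldl_cons, pvStepB, pvIdx]
    split_ifs <;> simp [ih]

theorem pvLemB2 (s : List Char) (l : List Char) (i : Nat) (hi : s.drop i = l)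
    (start : Nat) (hs : start ≤ i)
    (bc : Int) (iq : Bool) (qc : Option Char) (segs0 : List (List Char)) :
    pvFinB s ((pvIdx l (i : Int) bc iq qc).foldl (pvSliceStep s) (segs0, (start : Int)))
    = segs0 ++ (pvTrim ((pvRaw l bc iq qc).modifyHead
        (PySem.List.slice s (some (start : Int)) (some (i : Int)) ++ ·))).map PySem.Chars.strip := by
  induction l generalizing i start bc iq qc segs0 with
  | nil =>
    have hlen : s.length ≤ i := by
      have h := congrArg List.length hi
      simp at h
      omega
    have hcur : PySem.List.slice s (some (start : Int)) (some (i : Int)) = s.drop start := by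
      rw [PySem.List.slice_natCast]
      refine List.take_of_length_le ?_
      simp
      omega
    simp only [pvIdx, List.foldl_nil, pvRaw, List.modifyHead, pvTrim, pvFinB]
    by_cases h : start < s.length
    · have hd : s.drop start ≠ [] := by
        intro hne
        rw [List.drop_eq_nil_iff] at hne
        omega
      rw [if_pos (by exact_mod_cast h)]
      rw [PySem.List.slice_from_natCast]
      simp [hcur, hd]
    · have hd : s.drop start = [] := by
        rw [List.drop_eq_nil_iff]
        omega
      rw [if_neg (by omega)]
      simp [hcur, hd]
  | cons c t ih =>
    have ht : s.drop (i + 1) = t := by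
      rw [← List.drop_drop, hi]
      simp
    have hgc : s[i]? = some c := by
      rw [← List.head?_drop, hi]
      rfl
    have hslice : PySem.List.slice s (some (start : Int)) (some ((i : Int) + 1))
        = PySem.List.slice s (some (start : Int)) (some (i : Int)) ++ [c] := by
      have h1 : ((i : Int) + 1) = ((i + 1 : Nat) : Int) := by omega
      rw [h1, PySem.List.slice_natCast, PySem.List.slice_natCast]
      have h2 : i + 1 - start = (i - start) + 1 := by omega
      rw [h2, List.take_add_one]
      congr 1
      rw [List.getElem?_drop]
      have h3 : start + (i - start) = i := by omega
      rw [h3, hgc]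
      rfl
    have hip : (i : Int) + 1 = ((i + 1 : Nat) : Int) := by omega
    simp only [pvIdx, pvRaw]
    split_ifs with h1 h2 h3 h4 h5
    · rw [hip, ih (i + 1) ht start (by omega)]
      rw [pv_mh_mh, ← hip, hslice]
    · rw [hip, ih (i + 1) ht start (by omega)]
      rw [pv_mh_mh, ← hip, hslice]
    · rw [hip, ih (i + 1) ht start (by omega)]
      rw [pv_mh_mh, ← hip, hslice]
    · rw [hip, ih (i + 1) ht start (by omega)]
      rw [pv_mh_mh, ← hip, hslice]
    · -- comma: record boundary i, restart at i + 1
      simp only [List.foldl_cons, pvSliceStep]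
      rw [hip, ih (i + 1) ht (i + 1) (by omega)]
      have hz : PySem.List.slice s (some ((i + 1 : Nat) : Int)) (some ((i + 1 : Nat) : Int)) = [] := by
        rw [PySem.List.slice_natCast]
        simp
      rw [hz, pv_mh_nil]
      have hne := pvRaw_ne_nil t bc iq qc
      have hhd : ((([] : List Char) :: pvRaw t bc iq qc).modifyHead
          (PySem.List.slice s (some (start : Int)) (some (i : Int)) ++ ·))
          = PySem.List.slice s (some (start : Int)) (some (i : Int)) :: pvRaw t bc iq qc := by simp
      rw [hhd, pvTrim_cons _ _ hne]
      simp
    · rw [hip, ih (i + 1) ht start (by omega)]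
      rw [pv_mh_mh, ← hip, hslice]

theorem pvSliceZero (s : List Char) :
    PySem.List.slice s (some (0 : Int)) (some (0 : Int)) = [] := by
  rw [show (0 : Int) = ((0 : Nat) : Int) from rfl, PySem.List.slice_natCast]
  simp

-- ===== VERDICT (by name: the statement is the Claim_ definition above) =====
theorem parse_function_args_spec : Claim_equal_parse_function_args := by
  intro arg_string _
  unfold Spec_parse_function_args parse_function_args parse_function_args_alt
  rw [pvLemA, pv_mh_nil, pvLemB1]
  simp only [List.nil_append]
  have hB2 := pvLemB2 (pvClean arg_string) (pvClean arg_string) 0 List.drop_zero 0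
    (le_refl 0) 0 false none []
  simp only [Nat.cast_zero] at hB2
  rw [pvSliceZero, pv_mh_nil, List.nil_append] at hB2
  rw [hB2]
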